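-- pv_equiv track=rewrite | github.com/animesh-s/SML | src/vandalism_detection/features/longest_character_sequence.py | get_character_sequence_length
-- ===== SOURCE A (Python) =====
-- def get_character_sequence_length(inserted_text):
--     char_length_array = [0]*256
--
--     for i in range(0,256):
--         for j in range(0,len(inserted_text)):
--             if chr(i) == inserted_text[j]:
--                 next_char = inserted_text[j]
--                 k = 0
--                 length = 0
--                 while(next_char == chr(i)):
--                     length += 1
--                     k += 1
--                     if (j+k) >= len(inserted_text):
--                         break
--                     next_char = inserted_text[j+k]
--
--                 # check if length is greater than current max length
--                 if(length > char_length_array[i]):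
--                     char_length_array[i] = length
--
--     return char_length_array
-- ===== SOURCE B (Python) =====
-- def get_character_sequence_length(inserted_text):
--     # single linear pass: track the current run; update the 256-array as runs grow
--     char_length_array = [0] * 256
--     prev = None
--     run = 0
--     for ch in inserted_text:
--         if ch == prev:
--             run += 1
--         else:
--             prev = ch
--             run = 1
--         code = ord(ch)
--         if run > char_length_array[code]:
--             char_length_array[code] = run
--     return char_length_array
-- ===== Notes on version B (the rewrite author's own statement) =====
-- stated objective: faster
-- what changed: Replaces the 256-fold rescans of the text (with an inner while recomputing each run from every position) by one linear pass that maintains the current run length and updates the per-code maximum array in place.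
import Mathlib
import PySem

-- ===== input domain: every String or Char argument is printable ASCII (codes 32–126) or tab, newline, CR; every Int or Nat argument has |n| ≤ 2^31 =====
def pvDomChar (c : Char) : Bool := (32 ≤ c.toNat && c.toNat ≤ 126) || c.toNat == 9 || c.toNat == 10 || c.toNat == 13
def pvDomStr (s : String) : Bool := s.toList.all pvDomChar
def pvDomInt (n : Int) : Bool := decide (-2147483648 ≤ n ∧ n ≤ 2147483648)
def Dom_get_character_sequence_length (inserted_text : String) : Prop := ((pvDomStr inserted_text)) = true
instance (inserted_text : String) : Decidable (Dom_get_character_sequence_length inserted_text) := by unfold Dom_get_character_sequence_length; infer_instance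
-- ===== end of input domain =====

-- B replaces A's 256 rescans of the text (each recomputing every run with an inner while)
-- by one linear pass maintaining the current run length; objective: faster (asymptotic).

-- ===== PORT A =====
-- the inner `while` of A: length of the leading run of `c` in the remaining text
def pvRunFrom (c : Char) : List Char → Int
  | [] => 0
  | x :: xs => if x = c then 1 + pvRunFrom c xs else 0

-- the `j` loop of A for a fixed code `i` (char `c`), carrying char_length_array[i]
def pvScanA (c : Char) : List Char → Int → Int
  | [], best => best
  | x :: xs, best =>
    if x = c then
      let length := pvRunFrom c (x :: xs)
      pvScanA c xs (if length > best then length else best)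
    else pvScanA c xs best

def get_character_sequence_length (inserted_text : String) : List Int :=
  (List.range 256).map (fun i => pvScanA (Char.ofNat i) inserted_text.toList 0)

-- ===== PORT B =====
-- one step of B's single pass: state = (char_length_array, prev, run)
def pvStepB (st : List Int × Option Char × Int) (ch : Char) : List Int × Option Char × Int :=
  let arr := st.1
  let run : Int := if some ch = st.2.1 then st.2.2 + 1 else 1
  let code := ch.toNat
  ((if run > arr.getD code 0 then arr.set code run else arr), some ch, run)

def get_character_sequence_length_alt (inserted_text : String) : List Int :=
  (inserted_text.toList.foldl pvStepB (List.replicate 256 (0 : Int), none, 0)).1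

-- ===== PRECONDITION & SPEC =====
def Spec_get_character_sequence_length (inserted_text : String) (out : List Int) : Prop := out = get_character_sequence_length_alt inserted_text
instance (inserted_text : String) (out : List Int) : Decidable (Spec_get_character_sequence_length inserted_text out) := by unfold Spec_get_character_sequence_length; infer_instance

-- ===== CLAIM (what is proved, stated in full; the proofs are below) =====
def Claim_equal_get_character_sequence_length : Prop := ∀ (inserted_text : String), Dom_get_character_sequence_length inserted_text → Spec_get_character_sequence_length inserted_text (get_character_sequence_length inserted_text)

-- ===== LEMMAS AND PROOFS =====

-- the mathematical spec: max over all positions of the run length starting there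
def pvM (c : Char) : List Char → Int
  | [] => 0
  | x :: xs => max (pvRunFrom c (x :: xs)) (pvM c xs)

-- B's pass, restricted to one character c: cur = current run of c, best = max so far
def pvScanCont (c : Char) (cur best : Int) : List Char → Int
  | [] => best
  | x :: xs => if x = c then pvScanCont c (cur + 1) (max best (cur + 1)) xs
               else pvScanCont c 0 best xs

theorem pvRunFrom_nonneg (c : Char) (l : List Char) : 0 ≤ pvRunFrom c l := by
  induction l with
  | nil => simp [pvRunFrom]
  | cons x xs ih => simp only [pvRunFrom]; split <;> omega

theorem pvM_nonneg (c : Char) (l : List Char) : 0 ≤ pvM c l := by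
  induction l with
  | nil => simp [pvM]
  | cons x xs ih => simp only [pvM]; omega

theorem pvRunFrom_le_pvM (c : Char) (l : List Char) : pvRunFrom c l ≤ pvM c l := by
  cases l with
  | nil => simp [pvRunFrom, pvM]
  | cons x xs => simp only [pvM]; omega

theorem pvScanA_eq_max (c : Char) (l : List Char) : ∀ best : Int, 0 ≤ best →
    pvScanA c l best = max best (pvM c l) := by
  induction l with
  | nil => intro best hb; simp only [pvScanA, pvM]; omega
  | cons x xs ih =>
    intro best hb
    simp only [pvScanA, pvM]
    split
    · next hx =>
      rw [ih _ (by have := pvRunFrom_nonneg c (x :: xs); split <;> omega)]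
      have := pvM_nonneg c xs
      have := pvRunFrom_nonneg c xs
      simp only [pvRunFrom, if_pos hx]
      split <;> omega
    · next hx =>
      rw [ih _ hb]
      simp only [pvRunFrom, if_neg hx]
      have := pvM_nonneg c xs
      omega

theorem pvScanCont_eq (c : Char) (l : List Char) : ∀ cur best : Int, 0 ≤ cur → cur ≤ best →
    pvScanCont c cur best l = max best (max (cur + pvRunFrom c l) (pvM c l)) := by
  induction l with
  | nil =>
    intro cur best h0 hb
    simp only [pvScanCont, pvRunFrom, pvM]
    omega
  | cons x xs ih =>
    intro cur best h0 hb
    simp only [pvScanCont, pvM]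
    split
    · next hx =>
      rw [ih (cur + 1) (max best (cur + 1)) (by omega) (by omega)]
      simp only [pvRunFrom, if_pos hx]
      have := pvRunFrom_le_pvM c xs
      have := pvRunFrom_nonneg c xs
      omega
    · next hx =>
      rw [ih 0 best (by omega) (by omega)]
      simp only [pvRunFrom, if_neg hx]
      have := pvRunFrom_le_pvM c xs
      omega

theorem pvChar_toNat_ofNat {i : ℕ} (h : i < 256) : (Char.ofNat i).toNat = i := by
  have hv : Nat.isValidChar i := Or.inl (by omega)
  simp [Char.ofNat, hv, Char.toNat, Char.ofNatAux]

theorem pvLen_ite_set {arr : List Int} {n : ℕ} {v : Int} {b : Prop} [Decidable b] :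
    (if b then arr.set n v else arr).length = arr.length := by
  split <;> simp

theorem pvGetD_ite_set_ne {arr : List Int} {n i : ℕ} {v : Int} {b : Prop} [Decidable b]
    (h : n ≠ i) : (if b then arr.set n v else arr).getD i 0 = arr.getD i 0 := by
  split
  · rw [List.getD_eq_getElem?_getD, List.getElem?_set_ne h, ← List.getD_eq_getElem?_getD]
  · rfl

theorem pvGetD_max_set {arr : List Int} {i : ℕ} {v : Int} (h : i < arr.length) :
    (if v > arr.getD i 0 then arr.set i v else arr).getD i 0 = max (arr.getD i 0) v := by
  rw [List.getD_eq_getElem _ _ h]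
  split
  · next hgt =>
    rw [List.getD_eq_getElem _ _ (by simpa using h), List.getElem_set_self]
    omega
  · next hgt =>
    rw [List.getD_eq_getElem _ _ h]
    omega

theorem pvStepB_length (l : List Char) : ∀ st : List Int × Option Char × Int,
    (l.foldl pvStepB st).1.length = st.1.length := by
  induction l with
  | nil => intro st; simp
  | cons x xs ih =>
    intro st
    rw [List.foldl_cons, ih]
    exact pvLen_ite_set

theorem pvFold_getD (c : Char) (l : List Char) : ∀ (arr : List Int) (prev : Option Char) (run : Int)
    (i : ℕ), i < 256 → c = Char.ofNat i → arr.length = 256 → (∀ ch ∈ l, ch.toNat < 256) →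
    ((l.foldl pvStepB (arr, prev, run)).1).getD i 0
      = pvScanCont c (if prev = some c then run else 0) (arr.getD i 0) l := by
  induction l with
  | nil => intro arr prev run i hi hc hlen hdom; simp [pvScanCont]
  | cons ch xs ih =>
    intro arr prev run i hi hc hlen hdom
    rw [List.foldl_cons]
    simp only [pvStepB, pvScanCont]
    set run' : Int := if some ch = prev then run + 1 else 1 with hrun'
    set arr' : List Int := if run' > arr.getD ch.toNat 0 then arr.set ch.toNat run' else arr
      with harr'
    have hlen' : arr'.length = 256 := by rw [harr', pvLen_ite_set, hlen]
    rw [ih arr' (some ch) run' i hi hc hlen' (fun a ha => hdom a (by simp [ha]))]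
    by_cases hx : ch = c
    · subst hx
      have hcode : ch.toNat = i := by rw [hc, pvChar_toNat_ofNat hi]
      have hget : arr'.getD i 0 = max (arr.getD i 0) run' := by
        rw [harr', ← hcode]; exact pvGetD_max_set (by omega)
      have hcur : run' = (if prev = some ch then run else 0) + 1 := by
        rw [hrun']
        by_cases hp : prev = some ch <;> simp [hp, eq_comm]
      rw [if_pos (rfl : (some ch : Option Char) = some ch), if_pos (rfl : ch = ch), hget, hcur]
    · have hcode : ch.toNat ≠ i := by
        intro hEq
        apply hx
        have h1 : ch = Char.ofNat ch.toNat := (Char.ofNat_toNat ch).symm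
        rw [h1, hEq, ← hc]
      have hget : arr'.getD i 0 = arr.getD i 0 := by
        rw [harr']; exact pvGetD_ite_set_ne hcode
      rw [if_neg hx, hget]
      have hne : ¬ (some ch = some c) := by simpa using hx
      rw [if_neg hne]

theorem pvCodesBound (s : String) (h : Dom_get_character_sequence_length s) :
    ∀ ch ∈ s.toList, ch.toNat < 256 := by
  intro ch hch
  unfold Dom_get_character_sequence_length pvDomStr at h
  have := List.all_eq_true.mp h ch hch
  simp only [pvDomChar, Bool.or_eq_true, Bool.and_eq_true, decide_eq_true_eq, beq_iff_eq] at this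
  omega

-- ===== VERDICT (by name: the statement is the Claim_ definition above) =====
theorem get_character_sequence_length_spec : Claim_equal_get_character_sequence_length := by
  intro s hdom
  unfold Spec_get_character_sequence_length
  unfold get_character_sequence_length get_character_sequence_length_alt
  have hcodes := pvCodesBound s hdom
  have hlenB : ((s.toList.foldl pvStepB (List.replicate 256 (0 : Int), none, 0)).1).length = 256 := by
    rw [pvStepB_length]; exact List.length_replicate
  apply List.ext_getElem
  · rw [List.length_map, List.length_range, hlenB]
  · intro i h1 h2
    have h1' : i < 256 := by rwa [List.length_map, List.length_range] at h1
    rw [List.getElem_map, List.getElem_range]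
    rw [← List.getD_eq_getElem _ 0 h2]
    rw [pvFold_getD (Char.ofNat i) s.toList _ none 0 i h1' rfl List.length_replicate hcodes]
    rw [ite_self]
    rw [List.getD_eq_getElem _ _ (by rw [List.length_replicate]; exact h1'),
        List.getElem_replicate]
    rw [pvScanA_eq_max _ _ 0 le_rfl, pvScanCont_eq _ _ 0 0 le_rfl le_rfl]
    have ha := pvRunFrom_le_pvM (Char.ofNat i) s.toList
    have hb := pvM_nonneg (Char.ofNat i) s.toList
    omega
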